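-- pv_equiv track=rewrite | github.com/a-a-ronc/personalized-outreach | main.py | get_equipment_offer
-- ===== SOURCE A (Python) =====
-- def get_equipment_offer(icp_match: str, equipment: str, notes: str) -> tuple[str, str]:
--     """
--     Dynamically select equipment offer based on lead context
--
--     Args:
--         icp_match: ICP segment (e.g., "ICP 1", "ICP 2", etc.)
--         equipment: Equipment description from dataset
--         notes: ICP notes with additional context
--
--     Returns:
--         (equipment_category, software_mention)
--     """
--     # Normalize inputs for matching
--     equipment_lower = str(equipment).lower()
--     notes_lower = str(notes).lower()
--     combined_context = f"{equipment_lower} {notes_lower}"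
--
--     # Priority 1: High-Density Storage Systems
--     if any(keyword in equipment_lower for keyword in ["pallet shuttle", "push-back", "pallet flow", "deep-lane", "pushback"]):
--         equipment_category = "high-density storage systems - pallet shuttles, push-back rack, and deep-lane flow"
--         if icp_match in ["ICP 2", "ICP 5"]:
--             software_mention = " - and we built DensityPro to orchestrate the staging logic that most WMS systems miss"
--         else:
--             software_mention = ""
--         return (equipment_category, software_mention)
--
--     # Priority 2: Conveyor & Sortation
--     if any(keyword in equipment_lower for keyword in ["conveyor", "sortation", "case handling"]):
--         equipment_category = "case and pallet conveyor systems with integrated sortation"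
--         if icp_match == "ICP 4" and "national" in combined_context:
--             software_mention = " - and partner with Lully to handle the WMS orchestration that makes throughput targets actually achievable"
--         else:
--             software_mention = ""
--         return (equipment_category, software_mention)
--
--     # Priority 3: Pick Module & Racking Systems
--     if any(keyword in equipment_lower for keyword in ["pick module", "pick", "racking", "shelving", "mezzanine"]):
--         equipment_category = "racking systems and pick modules"
--         if icp_match in ["ICP 1", "ICP 3"]:
--             software_mention = " - and we've built slotting software (Warehousr) to help you reconfigure layouts as demand changes"
--         else:
--             software_mention = ""
--         return (equipment_category, software_mention)
--
--     # Priority 4: AMR/AGV Automation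
--     if any(keyword in equipment_lower for keyword in ["amr", "agv", "autonomous", "mobile robot"]):
--         equipment_category = "AMR and AGV systems for material flow automation"
--         software_mention = ""
--         return (equipment_category, software_mention)
--
--     # Fallback: General Material Handling
--     equipment_category = "material handling systems - from racking and conveyors to automation integration"
--     software_mention = ""
--     return (equipment_category, software_mention)
-- ===== SOURCE B (Python) =====
-- # Flat keyword->priority map; one min-reduction pass picks the best (lowest) matched
-- # priority level, then a single dispatch on that level builds the result.
-- PRIORITIES = [
--     ("pallet shuttle", 0), ("push-back", 0), ("pallet flow", 0), ("deep-lane", 0), ("pushback", 0),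
--     ("conveyor", 1), ("sortation", 1), ("case handling", 1),
--     ("pick module", 2), ("pick", 2), ("racking", 2), ("shelving", 2), ("mezzanine", 2),
--     ("amr", 3), ("agv", 3), ("autonomous", 3), ("mobile robot", 3),
-- ]
--
--
-- def _offer(p, icp, ctx):
--     if p == 0:
--         return ("high-density storage systems - pallet shuttles, push-back rack, and deep-lane flow",
--                 " - and we built DensityPro to orchestrate the staging logic that most WMS systems miss"
--                 if icp in ["ICP 2", "ICP 5"] else "")
--     if p == 1:
--         return ("case and pallet conveyor systems with integrated sortation",
--                 " - and partner with Lully to handle the WMS orchestration that makes throughput targets actually achievable"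
--                 if icp == "ICP 4" and "national" in ctx else "")
--     if p == 2:
--         return ("racking systems and pick modules",
--                 " - and we've built slotting software (Warehousr) to help you reconfigure layouts as demand changes"
--                 if icp in ["ICP 1", "ICP 3"] else "")
--     if p == 3:
--         return ("AMR and AGV systems for material flow automation", "")
--     return ("material handling systems - from racking and conveyors to automation integration", "")
--
--
-- def get_equipment_offer(icp_match: str, equipment: str, notes: str) -> tuple[str, str]:
--     equipment_lower = str(equipment).lower()
--     combined_context = equipment_lower + " " + str(notes).lower()
--     p = 4
--     for kw, lvl in PRIORITIES:
--         if lvl < p and kw in equipment_lower: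
--             p = lvl
--     return _offer(p, icp_match, combined_context)
-- ===== Notes on version B (the rewrite author's own statement) =====
-- stated objective: alternative
-- what changed: Replaces A's four-branch if/any/return chain with an arg-min reduction: one accumulator pass over a flat keyword-to-priority map computes the lowest matched priority level, and a single dispatch on that integer level builds the (category, mention) pair.
import Mathlib
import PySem

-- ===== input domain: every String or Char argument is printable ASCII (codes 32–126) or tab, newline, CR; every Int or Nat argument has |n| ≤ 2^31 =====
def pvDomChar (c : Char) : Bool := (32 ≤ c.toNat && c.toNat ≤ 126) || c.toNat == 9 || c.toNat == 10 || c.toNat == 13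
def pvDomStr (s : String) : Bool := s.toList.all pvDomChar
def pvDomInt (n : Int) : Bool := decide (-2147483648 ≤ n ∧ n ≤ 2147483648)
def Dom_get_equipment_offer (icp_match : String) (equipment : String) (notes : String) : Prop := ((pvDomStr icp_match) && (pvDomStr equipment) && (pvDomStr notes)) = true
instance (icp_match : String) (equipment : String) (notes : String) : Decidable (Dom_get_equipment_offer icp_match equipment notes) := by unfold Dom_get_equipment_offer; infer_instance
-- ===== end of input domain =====

-- B replaces A's four-branch if/any/return chain with an arg-min reduction over a flat
-- keyword->priority map followed by one dispatch on the resulting level; objective: alternative.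


-- ===== PORT A =====
-- Literal transliteration of A's if/return chain; strings handled as List Char via
-- PySem.Chars (lower, isIn = Python's 'in'); the f-string is list append with ' '.
def get_equipment_offer (icp_match : String) (equipment : String) (notes : String) : String × String :=
  let equipment_lower := PySem.Chars.lower equipment.toList
  let notes_lower := PySem.Chars.lower notes.toList
  let combined_context := equipment_lower ++ ' ' :: notes_lower
  if (["pallet shuttle", "push-back", "pallet flow", "deep-lane", "pushback"].any
        (fun k => PySem.Chars.isIn k.toList equipment_lower)) then
    (("high-density storage systems - pallet shuttles, push-back rack, and deep-lane flow" : String),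
     if icp_match ∈ ["ICP 2", "ICP 5"] then
       " - and we built DensityPro to orchestrate the staging logic that most WMS systems miss"
     else "")
  else if (["conveyor", "sortation", "case handling"].any
        (fun k => PySem.Chars.isIn k.toList equipment_lower)) then
    (("case and pallet conveyor systems with integrated sortation" : String),
     if icp_match = "ICP 4" ∧ PySem.Chars.isIn "national".toList combined_context then
       " - and partner with Lully to handle the WMS orchestration that makes throughput targets actually achievable"
     else "")
  else if (["pick module", "pick", "racking", "shelving", "mezzanine"].any
        (fun k => PySem.Chars.isIn k.toList equipment_lower)) then
    (("racking systems and pick modules" : String),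
     if icp_match ∈ ["ICP 1", "ICP 3"] then
       " - and we've built slotting software (Warehousr) to help you reconfigure layouts as demand changes"
     else "")
  else if (["amr", "agv", "autonomous", "mobile robot"].any
        (fun k => PySem.Chars.isIn k.toList equipment_lower)) then
    ("AMR and AGV systems for material flow automation", "")
  else
    ("material handling systems - from racking and conveyors to automation integration", "")

-- ===== PORT B =====
-- B's flat keyword -> priority-level map (Source B's PRIORITIES).
def pvPriorities : List (String × Nat) :=
  [("pallet shuttle", 0), ("push-back", 0), ("pallet flow", 0), ("deep-lane", 0), ("pushback", 0),
   ("conveyor", 1), ("sortation", 1), ("case handling", 1),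
   ("pick module", 2), ("pick", 2), ("racking", 2), ("shelving", 2), ("mezzanine", 2),
   ("amr", 3), ("agv", 3), ("autonomous", 3), ("mobile robot", 3)]

-- Source B's loop body: `if lvl < p and kw in equipment_lower: p = lvl`.
def pvStep (el : List Char) (a : Nat) (kp : String × Nat) : Nat :=
  if kp.2 < a ∧ PySem.Chars.isIn kp.1.toList el then kp.2 else a

-- Source B's _offer: dispatch on the minimal matched level.
def pvOffer (p : Nat) (icp : String) (ctx : List Char) : String × String :=
  if p = 0 then
    (("high-density storage systems - pallet shuttles, push-back rack, and deep-lane flow" : String),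
     if icp ∈ ["ICP 2", "ICP 5"] then
       " - and we built DensityPro to orchestrate the staging logic that most WMS systems miss"
     else "")
  else if p = 1 then
    (("case and pallet conveyor systems with integrated sortation" : String),
     if icp = "ICP 4" ∧ PySem.Chars.isIn "national".toList ctx then
       " - and partner with Lully to handle the WMS orchestration that makes throughput targets actually achievable"
     else "")
  else if p = 2 then
    (("racking systems and pick modules" : String),
     if icp ∈ ["ICP 1", "ICP 3"] then
       " - and we've built slotting software (Warehousr) to help you reconfigure layouts as demand changes"
     else "")
  else if p = 3 then
    ("AMR and AGV systems for material flow automation", "")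
  else
    ("material handling systems - from racking and conveyors to automation integration", "")

def get_equipment_offer_alt (icp_match : String) (equipment : String) (notes : String) : String × String :=
  let equipment_lower := PySem.Chars.lower equipment.toList
  let combined_context := equipment_lower ++ ' ' :: PySem.Chars.lower notes.toList
  pvOffer (pvPriorities.foldl (pvStep equipment_lower) 4) icp_match combined_context

-- ===== PRECONDITION & SPEC =====
def Spec_get_equipment_offer (icp_match : String) (equipment : String) (notes : String) (out : String × String) : Prop := out = get_equipment_offer_alt icp_match equipment notes
instance (icp_match : String) (equipment : String) (notes : String) (out : String × String) : Decidable (Spec_get_equipment_offer icp_match equipment notes out) := by unfold Spec_get_equipment_offer; infer_instance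

-- ===== CLAIM (what is proved, stated in full; the proofs are below) =====
def Claim_equal_get_equipment_offer : Prop := ∀ (icp_match : String) (equipment : String) (notes : String), Dom_get_equipment_offer icp_match equipment notes → Spec_get_equipment_offer icp_match equipment notes (get_equipment_offer icp_match equipment notes)

-- ===== LEMMAS AND PROOFS =====

-- the fold keeps its accumulator once it is ≤ every remaining level
theorem pvFoldC (el : List Char) (P : List (String × Nat)) (a : Nat)
    (h : ∀ kp ∈ P, a ≤ kp.2) : P.foldl (pvStep el) a = a := by
  induction P with
  | nil => rfl
  | cons hd tl ih =>
    have hhd := h hd (List.mem_cons_self ..)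
    simp only [List.foldl_cons, pvStep]
    rw [if_neg (by intro hc; omega)]
    exact ih (fun kp hm => h kp (List.mem_cons_of_mem _ hm))

-- a group with no matching keyword is skipped by the fold
theorem pvFoldA (el : List Char) (ks : List String) (lvl : Nat)
    (rest : List (String × Nat)) (a : Nat)
    (h : ks.any (fun k => PySem.Chars.isIn k.toList el) = false) :
    ((ks.map (fun k => (k, lvl))) ++ rest).foldl (pvStep el) a = rest.foldl (pvStep el) a := by
  induction ks with
  | nil => rfl
  | cons hd tl ih =>
    simp only [List.any_cons, Bool.or_eq_false_iff] at h
    simp only [List.map_cons, List.cons_append, List.foldl_cons, pvStep]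
    rw [if_neg (by intro hc; rw [h.1] at hc; exact Bool.false_ne_true hc.2)]
    exact ih h.2

-- a group with a match pins the fold to its level, provided later levels are no smaller
theorem pvFoldD (el : List Char) (ks : List String) (lvl : Nat)
    (rest : List (String × Nat)) (a : Nat)
    (hany : ks.any (fun k => PySem.Chars.isIn k.toList el) = true)
    (hla : lvl < a)
    (hrest : ∀ kp ∈ rest, lvl ≤ kp.2) :
    ((ks.map (fun k => (k, lvl))) ++ rest).foldl (pvStep el) a = lvl := by
  induction ks generalizing a with
  | nil => simp at hany
  | cons hd tl ih =>
    simp only [List.map_cons, List.cons_append, List.foldl_cons, pvStep]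
    by_cases hm : PySem.Chars.isIn hd.toList el = true
    · rw [if_pos ⟨hla, hm⟩]
      apply pvFoldC
      intro kp hkp
      rcases List.mem_append.mp hkp with h1 | h2
      · obtain ⟨k, _, rfl⟩ := List.mem_map.mp h1; exact le_refl _
      · exact hrest kp h2
    · rw [if_neg (by intro hc; exact hm hc.2)]
      have : (tl.any fun k => PySem.Chars.isIn k.toList el) = true := by
        simp only [List.any_cons, hm, Bool.false_or] at hany; exact hany
      exact ih _ this hla

-- characterisation of B's min-reduction as A's priority cascade
theorem pvFold_eq (el : List Char) :
    pvPriorities.foldl (pvStep el) 4 =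
    (if (["pallet shuttle", "push-back", "pallet flow", "deep-lane", "pushback"].any
          (fun k => PySem.Chars.isIn k.toList el)) then 0
     else if (["conveyor", "sortation", "case handling"].any
          (fun k => PySem.Chars.isIn k.toList el)) then 1
     else if (["pick module", "pick", "racking", "shelving", "mezzanine"].any
          (fun k => PySem.Chars.isIn k.toList el)) then 2
     else if (["amr", "agv", "autonomous", "mobile robot"].any
          (fun k => PySem.Chars.isIn k.toList el)) then 3
     else 4) := by
  have hP : pvPriorities =
      (["pallet shuttle", "push-back", "pallet flow", "deep-lane", "pushback"].map (fun k => (k, 0))) ++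
      ((["conveyor", "sortation", "case handling"].map (fun k => (k, 1))) ++
      ((["pick module", "pick", "racking", "shelving", "mezzanine"].map (fun k => (k, 2))) ++
      ((["amr", "agv", "autonomous", "mobile robot"].map (fun k => (k, 3))) ++
      ([] : List (String × Nat))))) := rfl
  rw [hP]
  by_cases h0 : (["pallet shuttle", "push-back", "pallet flow", "deep-lane", "pushback"].any
      (fun k => PySem.Chars.isIn k.toList el)) = true
  · rw [if_pos h0]; exact pvFoldD el _ 0 _ 4 h0 (by omega) (by intro kp hkp; omega)
  · rw [if_neg h0, pvFoldA el _ 0 _ 4 (Bool.not_eq_true _ ▸ (by simpa using h0))]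
    by_cases h1 : (["conveyor", "sortation", "case handling"].any
        (fun k => PySem.Chars.isIn k.toList el)) = true
    · rw [if_pos h1]
      exact pvFoldD el _ 1 _ 4 h1 (by omega) (by decide)
    · rw [if_neg h1, pvFoldA el _ 1 _ 4 (by simpa using h1)]
      by_cases h2 : (["pick module", "pick", "racking", "shelving", "mezzanine"].any
          (fun k => PySem.Chars.isIn k.toList el)) = true
      · rw [if_pos h2]
        exact pvFoldD el _ 2 _ 4 h2 (by omega) (by decide)
      · rw [if_neg h2, pvFoldA el _ 2 _ 4 (by simpa using h2)]
        by_cases h3 : (["amr", "agv", "autonomous", "mobile robot"].any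
            (fun k => PySem.Chars.isIn k.toList el)) = true
        · rw [if_pos h3]
          exact pvFoldD el _ 3 _ 4 h3 (by omega) (by decide)
        · rw [if_neg h3, pvFoldA el _ 3 _ 4 (by simpa using h3)]
          rfl

-- ===== VERDICT (by name: the statement is the Claim_ definition above) =====
theorem get_equipment_offer_spec : Claim_equal_get_equipment_offer := by
  intro icp_match equipment notes _
  unfold Spec_get_equipment_offer get_equipment_offer get_equipment_offer_alt
  simp only [pvFold_eq]
  split_ifs <;> simp_all [pvOffer]
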